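-- pv_equiv track=rewrite | github.com/andrewbelles/population-density | optimization/spaces.py | make_layer_choices
-- ===== SOURCE A (Python) =====
-- import itertools, optuna
--
-- def make_layer_choices(
--     sizes=(32, 64, 128, 256),
--     min_layers=1,
--     max_layers=3
-- ):
--     choices = {}
--     for L in range(min_layers, max_layers+1):
--         for combo in itertools.product(sizes, repeat=L):
--             if any(combo[i] < combo[i + 1] for i in range(len(combo) - 1)):
--                 continue
--             key = "-".join(str(x) for x in combo)
--             choices[key] = combo
--     return choices
-- ===== SOURCE B (Python) =====
-- def make_layer_choices(
--     sizes=(32, 64, 128, 256),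
--     min_layers=1,
--     max_layers=3
-- ):
--     uniq = list(dict.fromkeys(sizes))
--     out = {}
--     for L in range(min_layers, max_layers + 1):
--         # build the non-increasing L-tuples over uniq by extending on the left,
--         # keeping only tuples whose new head dominates the previous head
--         row = [()]
--         for _ in range(L):
--             row = [(s,) + t for s in uniq for t in row if not t or t[0] <= s]
--         for combo in row:
--             out["-".join(str(x) for x in combo)] = combo
--     return out
-- ===== Notes on version B (the rewrite author's own statement) =====
-- stated objective: alternative
-- what changed: Instead of enumerating every L-tuple of the cartesian product and filtering out increasing ones (with the dict deduplicating repeats from duplicate sizes), B deduplicates sizes once and builds each length's non-increasing tuples by repeated left-extension of the previous row, only ever creating valid tuples, in the same lexicographic-by-position order.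
import Mathlib
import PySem

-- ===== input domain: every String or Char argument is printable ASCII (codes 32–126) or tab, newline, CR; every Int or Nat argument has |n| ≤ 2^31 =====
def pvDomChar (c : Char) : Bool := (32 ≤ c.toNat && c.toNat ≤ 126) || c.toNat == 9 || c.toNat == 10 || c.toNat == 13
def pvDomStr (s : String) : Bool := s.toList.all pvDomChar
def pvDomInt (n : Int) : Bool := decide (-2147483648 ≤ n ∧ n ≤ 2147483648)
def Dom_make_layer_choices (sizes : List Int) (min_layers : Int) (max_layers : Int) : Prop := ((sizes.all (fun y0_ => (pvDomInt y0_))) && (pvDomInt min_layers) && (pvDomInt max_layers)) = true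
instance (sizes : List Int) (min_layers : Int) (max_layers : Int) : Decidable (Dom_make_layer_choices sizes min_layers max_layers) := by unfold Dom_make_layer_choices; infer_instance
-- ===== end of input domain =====

-- B builds only the non-increasing tuples over the deduplicated sizes by repeated row
-- extension, instead of A's filter over the full cartesian product (objective: alternative).

-- ===== PORT A =====
-- key = "-".join(str(x) for x in combo)   (same expression in both Pythons)
def pvKey (combo : List Int) : String :=
  PySem.Str.join "-" (combo.map PySem.Int.toStr)

-- any(combo[i] < combo[i + 1] for i in range(len(combo) - 1))
def pvAnyInc (combo : List Int) : Bool :=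
  (PySem.List.pyRange 0 (PySem.List.len combo - 1) 1).any
    (fun i => decide (PySem.List.pyGetD combo i 0 < PySem.List.pyGetD combo (i + 1) 0))

-- itertools.product(sizes, repeat=L), leftmost position varying slowest
def pvProdPow (sizes : List Int) : Nat → List (List Int)
  | 0 => [[]]
  | k + 1 => sizes.flatMap (fun x => (pvProdPow sizes k).map (x :: ·))

def make_layer_choices (sizes : List Int) (min_layers : Int) (max_layers : Int) : List (String × List Int) :=
  ((PySem.List.pyRange min_layers (max_layers + 1) 1).foldl
    (fun d L =>
      (pvProdPow sizes L.toNat).foldl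
        (fun d combo =>
          if pvAnyInc combo then d else d.insert (pvKey combo) combo) d)
    PySem.Dict.empty).items

-- ===== PORT B =====
-- row = [(s,) + t for s in uniq for t in row if not t or t[0] <= s]
def pvExtend (uniq : List Int) (row : List (List Int)) : List (List Int) :=
  uniq.flatMap (fun s =>
    ((row.filter (fun t => match t with | [] => true | a :: _ => decide (a ≤ s))).map (s :: ·)))

def make_layer_choices_alt (sizes : List Int) (min_layers : Int) (max_layers : Int) : List (String × List Int) :=
  let uniq := PySem.List.dedup sizes
  ((PySem.List.pyRange min_layers (max_layers + 1) 1).foldl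
    (fun d L =>
      ((PySem.List.pyRange 0 L 1).foldl (fun row _ => pvExtend uniq row) [[]]).foldl
        (fun d combo => d.insert (pvKey combo) combo) d)
    PySem.Dict.empty).items

-- ===== PRECONDITION & SPEC =====
-- Pre_ excludes only the inputs where A raises: itertools.product(sizes, repeat=L) raises
-- ValueError for a negative L, i.e. whenever min_layers < 0 and the range is nonempty.
def Pre_make_layer_choices (sizes : List Int) (min_layers : Int) (max_layers : Int) : Prop :=
  0 ≤ min_layers ∨ max_layers < min_layers

instance (sizes : List Int) (min_layers : Int) (max_layers : Int) : Decidable (Pre_make_layer_choices sizes min_layers max_layers) := by unfold Pre_make_layer_choices; infer_instance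

def pvWitness_make_layer_choices : List Int × Int × Int := ([32, 64, 128], 1, 2)

def Spec_make_layer_choices (sizes : List Int) (min_layers : Int) (max_layers : Int) (out : List (String × List Int)) : Prop := out = make_layer_choices_alt sizes min_layers max_layers
instance (sizes : List Int) (min_layers : Int) (max_layers : Int) (out : List (String × List Int)) : Decidable (Spec_make_layer_choices sizes min_layers max_layers out) := by unfold Spec_make_layer_choices; infer_instance

-- ===== CLAIM (what is proved, stated in full; the proofs are below) =====
def Claim_equal_make_layer_choices : Prop := ∀ (sizes : List Int) (min_layers : Int) (max_layers : Int), Dom_make_layer_choices sizes min_layers max_layers → Pre_make_layer_choices sizes min_layers max_layers → Spec_make_layer_choices sizes min_layers max_layers (make_layer_choices sizes min_layers max_layers)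

-- ===== LEMMAS AND PROOFS =====

def pvMyDigits (n : Nat) : List Char :=
  if _h : n < 10 then [Nat.digitChar n]
  else pvMyDigits (n / 10) ++ [Nat.digitChar (n % 10)]
decreasing_by exact Nat.div_lt_self (by omega) (by omega)

def pvVal (l : List Char) : Nat := l.foldl (fun a c => 10 * a + (c.toNat - 48)) 0

def pvIsDig (c : Char) : Prop := 48 ≤ c.toNat ∧ c.toNat ≤ 57

theorem pvDigitChar_dig (d : Nat) (h : d < 10) : pvIsDig (Nat.digitChar d) := by
  interval_cases d <;> exact ⟨by decide, by decide⟩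

theorem pvDigitChar_val (d : Nat) (h : d < 10) : (Nat.digitChar d).toNat - 48 = d := by
  interval_cases d <;> rfl

theorem pvMyDigits_ne_nil (n : Nat) : pvMyDigits n ≠ [] := by
  rw [pvMyDigits]
  split <;> simp

theorem pvMyDigits_dig (n : Nat) : ∀ c ∈ pvMyDigits n, pvIsDig c := by
  induction n using Nat.strong_induction_on with
  | _ n ih =>
      rw [pvMyDigits]
      split
      · intro c hc
        rw [List.mem_singleton] at hc
        subst hc
        exact pvDigitChar_dig n (by omega)
      · intro c hc
        rcases List.mem_append.mp hc with h | h
        · exact ih (n / 10) (Nat.div_lt_self (by omega) (by omega)) c h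
        · rw [List.mem_singleton] at h
          subst h
          exact pvDigitChar_dig _ (Nat.mod_lt _ (by omega))

theorem pvVal_append_singleton (l : List Char) (c : Char) :
    pvVal (l ++ [c]) = 10 * pvVal l + (c.toNat - 48) := by
  simp [pvVal, List.foldl_append]

theorem pvVal_myDigits (n : Nat) : pvVal (pvMyDigits n) = n := by
  induction n using Nat.strong_induction_on with
  | _ n ih =>
      rw [pvMyDigits]
      split
      · rename_i h
        show pvVal ([] ++ [Nat.digitChar n]) = n
        rw [pvVal_append_singleton, pvDigitChar_val n h]
        simp [pvVal]
      · rename_i h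
        rw [pvVal_append_singleton, ih (n / 10) (Nat.div_lt_self (by omega) (by omega)),
          pvDigitChar_val _ (Nat.mod_lt _ (by omega))]
        omega

theorem pvMyDigits_inj (a b : Nat) (h : pvMyDigits a = pvMyDigits b) : a = b := by
  have := pvVal_myDigits a
  rw [h, pvVal_myDigits] at this
  omega

theorem pvCore (f : Nat) : ∀ (n : Nat) (l : List Char), n < 10 ^ (f + 1) →
    Nat.toDigitsCore 10 (f + 1) n l = pvMyDigits n ++ l := by
  induction f with
  | zero =>
      intro n l h
      have h10 : n < 10 := by simpa using h
      have hdiv : n / 10 = 0 := Nat.div_eq_of_lt h10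
      show (if n / 10 = 0 then _ else _) = _
      rw [if_pos hdiv, pvMyDigits, dif_pos h10, Nat.mod_eq_of_lt h10]
      rfl
  | succ f ih =>
      intro n l h
      show (if n / 10 = 0 then _ else _) = _
      by_cases hdiv : n / 10 = 0
      · have h10 : n < 10 := by omega
        rw [if_pos hdiv, pvMyDigits, dif_pos h10, Nat.mod_eq_of_lt h10]
        rfl
      · rw [if_neg hdiv]
        have hlt : n / 10 < 10 ^ (f + 1) := by
          rw [Nat.div_lt_iff_lt_mul (by omega)]
          calc n < 10 ^ (f + 1 + 1) := h
          _ = 10 ^ (f + 1) * 10 := by ring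
        rw [ih (n / 10) _ hlt]
        conv_rhs => rw [pvMyDigits]
        rw [dif_neg (show ¬ n < 10 by omega)]
        simp

theorem pvToDigits_eq (m : Nat) : Nat.toDigits 10 m = pvMyDigits m := by
  show Nat.toDigitsCore 10 (m + 1) m [] = _
  cases m with
  | zero => rw [pvCore 0 0 [] (by norm_num)]; simp
  | succ m =>
      rw [show m + 1 + 1 = (m + 1) + 1 from rfl, pvCore (m + 1) (m + 1) []
        (lt_trans (Nat.lt_pow_self (by norm_num)) (Nat.pow_lt_pow_succ (by norm_num)))]
      simp

theorem pvToChars_eq (n : Int) :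
    PySem.Int.toChars n = if n < 0 then '-' :: pvMyDigits n.natAbs else pvMyDigits n.toNat := by
  show (if n < 0 then '-' :: Nat.toDigits 10 n.natAbs else Nat.toDigits 10 n.toNat) = _
  rw [pvToDigits_eq, pvToDigits_eq]

-- a maximal digit run followed by a non-digit (or nothing) determines the split
theorem pvDR (d₁ : List Char) :
    ∀ (d₂ r s : List Char), (∀ c ∈ d₁, pvIsDig c) → (∀ c ∈ d₂, pvIsDig c) →
    (∀ c, r.head? = some c → ¬ pvIsDig c) → (∀ c, s.head? = some c → ¬ pvIsDig c) →
    d₁ ++ r = d₂ ++ s → d₁ = d₂ ∧ r = s := by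
  induction d₁ with
  | nil =>
      intro d₂ r s _ hd₂ hr _ heq
      cases d₂ with
      | nil => exact ⟨rfl, heq⟩
      | cons c d₂' =>
          exfalso
          simp only [List.nil_append] at heq
          subst heq
          exact hr c rfl (hd₂ c (by simp))
  | cons c d₁' ih =>
      intro d₂ r s hd₁ hd₂ hr hs heq
      cases d₂ with
      | nil =>
          exfalso
          simp only [List.nil_append] at heq
          subst heq
          exact hs c rfl (hd₁ c (by simp))
      | cons c' d₂' =>
          simp only [List.cons_append, List.cons.injEq] at heq
          obtain ⟨rfl, heq⟩ := heq
          obtain ⟨h1, h2⟩ := ih d₂' r s (fun x hx => hd₁ x (by simp [hx]))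
            (fun x hx => hd₂ x (by simp [hx])) hr hs heq
          exact ⟨by rw [h1], h2⟩

theorem pvDash_not_dig : ¬ pvIsDig '-' := by intro h; exact absurd h.1 (by decide)

theorem pvSepHead (r : List Char) (h : r = [] ∨ ∃ t, r = '-' :: t) :
    ∀ c, r.head? = some c → ¬ pvIsDig c := by
  rcases h with rfl | ⟨t, rfl⟩
  · intro c hc; cases hc
  · intro c hc
    rw [List.head?_cons, Option.some_inj] at hc
    subst hc
    exact pvDash_not_dig

theorem pvTOK (a b : Int) (r s : List Char)
    (hr : r = [] ∨ ∃ t, r = '-' :: t) (hs : s = [] ∨ ∃ t, s = '-' :: t)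
    (h : PySem.Int.toChars a ++ r = PySem.Int.toChars b ++ s) : a = b ∧ r = s := by
  rw [pvToChars_eq, pvToChars_eq] at h
  by_cases ha : a < 0 <;> by_cases hb : b < 0
  · rw [if_pos ha, if_pos hb] at h
    simp only [List.cons_append, List.cons.injEq, true_and] at h
    obtain ⟨h1, h2⟩ := pvDR _ _ _ _ (pvMyDigits_dig _) (pvMyDigits_dig _)
      (pvSepHead r hr) (pvSepHead s hs) h
    exact ⟨by have := pvMyDigits_inj _ _ h1; omega, h2⟩
  · exfalso
    rw [if_pos ha, if_neg hb] at h
    -- LHS head is '-', RHS head is a digit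
    cases hmd : pvMyDigits b.toNat with
    | nil => exact pvMyDigits_ne_nil _ hmd
    | cons c t =>
        rw [hmd] at h
        simp only [List.cons_append, List.cons.injEq] at h
        have : pvIsDig c := pvMyDigits_dig b.toNat c (by rw [hmd]; simp)
        rw [← h.1] at this
        exact pvDash_not_dig this
  · exfalso
    rw [if_neg ha, if_pos hb] at h
    cases hmd : pvMyDigits a.toNat with
    | nil => exact pvMyDigits_ne_nil _ hmd
    | cons c t =>
        rw [hmd] at h
        simp only [List.cons_append, List.cons.injEq] at h
        have : pvIsDig c := pvMyDigits_dig a.toNat c (by rw [hmd]; simp)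
        rw [h.1] at this
        exact pvDash_not_dig this
  · rw [if_neg ha, if_neg hb] at h
    obtain ⟨h1, h2⟩ := pvDR _ _ _ _ (pvMyDigits_dig _) (pvMyDigits_dig _)
      (pvSepHead r hr) (pvSepHead s hs) h
    exact ⟨by have := pvMyDigits_inj _ _ h1; omega, h2⟩

def pvJn : List (List Char) → List Char
  | [] => []
  | [a] => a
  | a :: b :: rest => a ++ '-' :: pvJn (b :: rest)

theorem pvToChars_ne_nil (n : Int) : PySem.Int.toChars n ≠ [] := by
  rw [pvToChars_eq]
  split
  · simp
  · exact pvMyDigits_ne_nil _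

theorem pvJn_inj (xs : List Int) :
    ∀ ys : List Int, pvJn (xs.map PySem.Int.toChars) = pvJn (ys.map PySem.Int.toChars) → xs = ys := by
  induction xs with
  | nil =>
      intro ys h
      cases ys with
      | nil => rfl
      | cons y ys' =>
          exfalso
          cases ys' with
          | nil => exact pvToChars_ne_nil y (by simpa [pvJn] using h.symm)
          | cons y' t =>
              simp only [List.map_cons, pvJn] at h
              exact (List.append_ne_nil_of_left_ne_nil (pvToChars_ne_nil y) _) h.symm
  | cons x xs' ih =>
      intro ys h
      cases ys with
      | nil =>
          exfalso
          cases xs' with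
          | nil => exact pvToChars_ne_nil x (by simpa [pvJn] using h)
          | cons x' t =>
              simp only [List.map_cons, pvJn] at h
              exact (List.append_ne_nil_of_left_ne_nil (pvToChars_ne_nil x) _) h
      | cons y ys' =>
          cases xs' with
          | nil =>
              cases ys' with
              | nil =>
                  simp only [List.map_cons, List.map_nil, pvJn] at h
                  obtain ⟨h1, -⟩ := pvTOK x y [] []
                    (Or.inl rfl) (Or.inl rfl) (by simpa using h)
                  rw [h1]
              | cons y' t =>
                  exfalso
                  simp only [List.map_cons, List.map_nil, pvJn] at h
                  obtain ⟨-, h2⟩ := pvTOK x y [] ('-' :: pvJn (PySem.Int.toChars y' :: t.map PySem.Int.toChars))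
                    (Or.inl rfl) (Or.inr ⟨_, rfl⟩) (by simpa using h)
                  cases h2
          | cons x' t =>
              cases ys' with
              | nil =>
                  exfalso
                  simp only [List.map_cons, List.map_nil, pvJn] at h
                  obtain ⟨-, h2⟩ := pvTOK x y ('-' :: pvJn (PySem.Int.toChars x' :: t.map PySem.Int.toChars)) []
                    (Or.inr ⟨_, rfl⟩) (Or.inl rfl) (by simpa using h)
                  cases h2
              | cons y' u =>
                  simp only [List.map_cons, pvJn] at h
                  obtain ⟨h1, h2⟩ := pvTOK x y
                    ('-' :: pvJn (PySem.Int.toChars x' :: t.map PySem.Int.toChars))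
                    ('-' :: pvJn (PySem.Int.toChars y' :: u.map PySem.Int.toChars))
                    (Or.inr ⟨_, rfl⟩) (Or.inr ⟨_, rfl⟩) (by simpa using h)
                  rw [List.cons.injEq] at h2
                  have := ih (y' :: u) (by simpa [pvJn] using h2.2)
                  rw [h1, this]

theorem pvJn_eq_intercalate (parts : List (List Char)) :
    List.intercalate ['-'] parts = pvJn parts := by
  induction parts with
  | nil => rfl
  | cons a rest ih =>
      cases rest with
      | nil => simp [List.intercalate, pvJn]
      | cons b t =>
          simp only [pvJn, ← ih]
          simp [List.intercalate]

theorem pvKey_toList (c : List Int) :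
    (pvKey c).toList = pvJn (c.map PySem.Int.toChars) := by
  show (PySem.Str.join "-" (c.map PySem.Int.toStr)).toList = _
  rw [PySem.Str.toList_join]
  show List.intercalate "-".toList (List.map String.toList (c.map PySem.Int.toStr)) = _
  rw [List.map_map]
  have : String.toList ∘ PySem.Int.toStr = PySem.Int.toChars := by
    funext n
    exact PySem.Int.toList_toStr n
  rw [this]
  have hsep : "-".toList = ['-'] := rfl
  rw [hsep, pvJn_eq_intercalate]

theorem pvKey_inj (c₁ c₂ : List Int) (h : pvKey c₁ = pvKey c₂) : c₁ = c₂ := by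
  apply pvJn_inj
  rw [← pvKey_toList, ← pvKey_toList, h]

def pvDD {α : Type} [DecidableEq α] (acc : List α) : List α → List α
  | [] => []
  | x :: xs => if x ∈ acc then pvDD acc xs else x :: pvDD (acc ++ [x]) xs

theorem pvFoldAdd {α : Type} [DecidableEq α] [BEq α] [LawfulBEq α] (l : List α) :
    ∀ acc : List α, List.foldl PySem.Set.add acc l = acc ++ pvDD acc l := by
  induction l with
  | nil => intro acc; simp [pvDD]
  | cons x xs ih =>
      intro acc
      simp only [List.foldl_cons, pvDD, PySem.Set.add]
      by_cases hx : x ∈ acc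
      · rw [if_pos (by simpa [List.contains_iff_mem] using hx), if_pos hx]
        exact ih acc
      · rw [if_neg (by simpa [List.contains_iff_mem] using hx), if_neg hx]
        rw [ih (acc ++ [x])]
        simp

theorem pvDedup_eq {α : Type} [DecidableEq α] [BEq α] [LawfulBEq α] (l : List α) :
    PySem.List.dedup l = pvDD [] l := by
  rw [PySem.List.dedup_eq_ofList]
  show List.foldl PySem.Set.add PySem.Set.empty l = _
  have : (PySem.Set.empty : PySem.Set α) = ([] : List α) := rfl
  rw [this, pvFoldAdd]
  simp

theorem pvDD_filter {α : Type} [DecidableEq α] (l : List α) :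
    ∀ acc : List α, pvDD acc l = (pvDD [] l).filter (fun y => decide (y ∉ acc)) := by
  induction l with
  | nil => intro acc; simp [pvDD]
  | cons x xs ih =>
      intro acc
      simp only [pvDD]
      rw [if_neg (List.not_mem_nil)]
      simp only [List.nil_append]
      by_cases hx : x ∈ acc
      · rw [if_pos hx]
        rw [List.filter_cons_of_neg (by simpa using hx)]
        rw [ih acc, ih [x], List.filter_filter]
        apply List.filter_congr
        intro y _
        by_cases hy : y ∈ acc
        · simp [hy]
        · have : y ≠ x := fun h => hy (h ▸ hx)
          simp [hy, this]
  
      · rw [if_neg hx]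
        rw [List.filter_cons_of_pos (by simpa using hx)]
        congr 1
        rw [ih (acc ++ [x]), ih [x], List.filter_filter]
        apply List.filter_congr
        intro y _
        by_cases hy : y ∈ acc
        · simp [hy]
        · by_cases hyx : y = x <;> simp [hy, hyx]

theorem pvDedup_cons {α : Type} [DecidableEq α] [BEq α] [LawfulBEq α] (x : α) (l : List α) :
    PySem.List.dedup (x :: l) = x :: (PySem.List.dedup l).filter (fun y => decide (y ≠ x)) := by
  rw [pvDedup_eq, pvDedup_eq]
  show pvDD [] (x :: l) = _
  simp only [pvDD, List.not_mem_nil, if_false, List.nil_append]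
  rw [pvDD_filter l [x]]
  congr 1
  apply List.filter_congr
  intro y _
  simp

theorem pvDedup_append {α : Type} [DecidableEq α] [BEq α] [LawfulBEq α] (a b : List α) :
    PySem.List.dedup (a ++ b)
      = PySem.List.dedup a ++ (PySem.List.dedup b).filter (fun y => decide (y ∉ a)) := by
  rw [PySem.List.dedup_eq_ofList]
  show List.foldl PySem.Set.add PySem.Set.empty (a ++ b) = _
  rw [List.foldl_append]
  show List.foldl PySem.Set.add (PySem.Set.ofList a) b = _
  rw [pvFoldAdd, ← PySem.List.dedup_eq_ofList, pvDD_filter b (PySem.List.dedup a), pvDedup_eq b]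
  congr 1
  apply List.filter_congr
  intro y _
  simp

theorem pvDedup_filter {α : Type} [DecidableEq α] [BEq α] [LawfulBEq α] (p : α → Bool) (l : List α) :
    PySem.List.dedup (l.filter p) = (PySem.List.dedup l).filter p := by
  induction l with
  | nil => simp [PySem.List.dedup, PySem.Set.ofList, List.foldl]
  | cons x xs ih =>
      by_cases hp : p x
      · rw [List.filter_cons_of_pos hp, pvDedup_cons, pvDedup_cons,
          List.filter_cons_of_pos hp, ih, List.filter_filter, List.filter_filter]
        congr 1
        apply List.filter_congr
        intro y _
        by_cases hyx : y = x <;> simp [hyx, Bool.and_comm]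
      · rw [List.filter_cons_of_neg hp, pvDedup_cons, List.filter_cons_of_neg hp, ih,
          List.filter_filter]
        apply (List.filter_congr ?_).symm
        intro y _
        by_cases hyx : y = x
        · subst hyx; simp [hp]
        · simp [hyx]

theorem pvDedup_nodup {α : Type} [DecidableEq α] [BEq α] [LawfulBEq α] (l : List α) (h : l.Nodup) :
    PySem.List.dedup l = l := by
  induction l with
  | nil => simp [PySem.List.dedup, PySem.Set.ofList, List.foldl]
  | cons x xs ih =>
      rw [pvDedup_cons, ih h.of_cons]
      congr 1
      rw [List.filter_eq_self]
      intro y hy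
      have : y ≠ x := by rintro rfl; exact (List.nodup_cons.mp h).1 hy
      simpa using this

def pvGen (uniq : List Int) (bound : Option Int) : Nat → List (List Int)
  | 0 => [[]]
  | k + 1 =>
      uniq.flatMap (fun s =>
        if (match bound with | none => true | some b => decide (s ≤ b)) then
          (pvGen uniq (some s) k).map (s :: ·)
        else [])

def pvNI (c : List Int) : Bool := decide (List.IsChain (fun a b => b ≤ a) c)

def pvBOk : Option Int → List Int → Bool
  | none, _ => true
  | some _, [] => true
  | some b, a :: _ => decide (a ≤ b)

theorem pvFlatMap_congr {α β : Type} (l : List α) (f g : α → List β)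
    (h : ∀ x ∈ l, f x = g x) : l.flatMap f = l.flatMap g := by
  induction l with
  | nil => rfl
  | cons x xs ih =>
      rw [List.flatMap_cons, List.flatMap_cons, h x (by simp),
        ih (fun y hy => h y (by simp [hy]))]

theorem pvFlatMap_filter {α β : Type} (l : List α) (p : α → Bool) (g : α → List β) :
    (l.filter p).flatMap g = l.flatMap (fun x => if p x then g x else []) := by
  induction l with
  | nil => rfl
  | cons x xs ih =>
      by_cases hp : p x
      · rw [List.filter_cons_of_pos hp, List.flatMap_cons, List.flatMap_cons, if_pos hp, ih]
      · rw [List.filter_cons_of_neg hp, List.flatMap_cons, if_neg hp, ih]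
        simp

theorem pvDedup_map_cons (x : Int) (P : List (List Int)) :
    PySem.List.dedup (P.map (x :: ·)) = (PySem.List.dedup P).map (x :: ·) := by
  induction P with
  | nil => simp [PySem.List.dedup, PySem.Set.ofList, List.foldl]
  | cons c P ih =>
      rw [List.map_cons, pvDedup_cons, pvDedup_cons, ih, List.map_cons, List.filter_map]
      congr 2
      apply List.filter_congr
      intro y _
      simp

theorem pvDedup_flatMap_cons (xs : List Int) (P : List (List Int)) :
    PySem.List.dedup (xs.flatMap (fun x => P.map (x :: ·)))
      = (PySem.List.dedup xs).flatMap (fun x => (PySem.List.dedup P).map (x :: ·)) := by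
  induction xs with
  | nil => simp [PySem.List.dedup, PySem.Set.ofList, List.foldl]
  | cons x xs ih =>
      rw [List.flatMap_cons, pvDedup_append, ih, pvDedup_cons, List.flatMap_cons]
      congr 1
      · exact pvDedup_map_cons x P
      · rw [List.filter_flatMap, pvFlatMap_filter]
        apply pvFlatMap_congr
        intro z _
        by_cases hz : z = x
        · subst hz
          rw [if_neg (by simp)]
          rw [List.filter_eq_nil_iff]
          rintro y hy
          simp only [List.mem_map] at hy
          obtain ⟨c, hc, rfl⟩ := hy
          have : c ∈ P := (PySem.List.mem_dedup P c).mp hc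
          simp only [decide_eq_true_eq, not_not]
          exact List.mem_map.mpr ⟨c, this, rfl⟩
        · rw [if_pos (by simpa using hz)]
          rw [List.filter_eq_self]
          intro y hy
          simp only [List.mem_map] at hy
          obtain ⟨c, -, rfl⟩ := hy
          simp only [decide_eq_true_eq]
          intro hmem
          simp only [List.mem_map] at hmem
          obtain ⟨c', -, heq⟩ := hmem
          exact hz (by injection heq.symm)

theorem pvDedup_prodPow (sizes : List Int) (k : Nat) :
    PySem.List.dedup (pvProdPow sizes k) = pvProdPow (PySem.List.dedup sizes) k := by
  induction k with
  | zero =>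
      show PySem.List.dedup [[]] = [[]]
      rw [pvDedup_cons]
      simp [PySem.List.dedup, PySem.Set.ofList, List.foldl]
  | succ k ih =>
      show PySem.List.dedup (sizes.flatMap fun x => (pvProdPow sizes k).map (x :: ·)) = _
      rw [pvDedup_flatMap_cons, ih]
      rfl

theorem pvProdPow_length (sizes : List Int) (k : Nat) :
    ∀ c ∈ pvProdPow sizes k, c.length = k := by
  induction k with
  | zero => intro c hc; simp [pvProdPow] at hc; simp [hc]
  | succ k ih =>
      intro c hc
      simp only [pvProdPow, List.mem_flatMap, List.mem_map] at hc
      obtain ⟨x, -, t, ht, rfl⟩ := hc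
      simp [ih t ht]

theorem pvNI_cons (s : Int) (c : List Int) :
    pvNI (s :: c) = (pvBOk (some s) c && pvNI c) := by
  cases c with
  | nil => simp [pvNI, pvBOk]
  | cons a t =>
      simp only [pvNI, pvBOk, List.isChain_cons_cons]
      by_cases h : a ≤ s <;> simp [h]

theorem pvGen_eq_filter (u : List Int) (k : Nat) :
    ∀ bnd : Option Int, pvGen u bnd k = (pvProdPow u k).filter (fun c => pvBOk bnd c && pvNI c) := by
  induction k with
  | zero =>
      intro bnd
      show [[]] = List.filter _ [[]]
      have h1 : pvBOk bnd [] = true := by cases bnd <;> rfl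
      have h2 : pvNI [] = true := by simp [pvNI]
      simp [h1, h2]
  | succ k ih =>
      intro bnd
      show u.flatMap _ = List.filter _ (u.flatMap fun x => (pvProdPow u k).map (x :: ·))
      rw [List.filter_flatMap]
      apply pvFlatMap_congr
      intro s _
      rw [List.filter_map]
      by_cases hc : (match bnd with | none => true | some b => decide (s ≤ b)) = true
      · rw [if_pos hc, ih (some s)]
        congr 1
        apply List.filter_congr
        intro c _
        show (pvBOk (some s) c && pvNI c) = ((fun c => pvBOk bnd c && pvNI c) ∘ (s :: ·)) c
        simp only [Function.comp]
        rw [pvNI_cons]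
        have : pvBOk bnd (s :: c) = true := by
          cases bnd with
          | none => rfl
          | some b => simpa [pvBOk] using hc
        rw [this]
        simp
      · rw [if_neg hc]
        symm
        rw [List.map_eq_nil_iff, List.filter_eq_nil_iff]
        intro c _
        have : pvBOk bnd (s :: c) = false := by
          cases bnd with
          | none => exact absurd rfl hc
          | some b => simpa [pvBOk] using hc
        simp [Function.comp, this]

theorem pvPyRange_eq (a b : Int) :
    PySem.List.pyRange a b 1 = (List.range (b - a).toNat).map (fun k : Nat => a + (k : Int)) := by
  show (if (1 : Int) = 0 then _ else _) = _
  rw [if_neg (by norm_num)]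
  have h1 : (0 : Int) < 1 := by norm_num
  simp only [if_pos h1]
  by_cases hab : a < b
  · rw [if_pos hab]
    have : (b - a + 1 - 1) / 1 = b - a := by
      rw [show b - a + 1 - 1 = b - a by ring, Int.ediv_one]
    rw [this]
    apply List.map_congr_left
    intro k _
    ring
  · rw [if_neg hab]
    have : (b - a).toNat = 0 := by omega
    simp [this]

theorem pvPyRange_nil (a b : Int) (h : b ≤ a) : PySem.List.pyRange a b 1 = [] := by
  rw [pvPyRange_eq]
  have : (b - a).toNat = 0 := by omega
  simp [this]

theorem pvPyRange_mem (a b x : Int) (h : x ∈ PySem.List.pyRange a b 1) : a ≤ x := by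
  rw [pvPyRange_eq] at h
  simp only [List.mem_map, List.mem_range] at h
  obtain ⟨k, -, rfl⟩ := h
  omega

theorem pvPyRange_nodup (a b : Int) : (PySem.List.pyRange a b 1).Nodup := by
  rw [pvPyRange_eq]
  exact List.nodup_range.map (fun x y hxy => by omega)

theorem pvRangeAny (c : List Int) :
    ((List.range (c.length - 1)).any fun k => decide (c.getD k 0 < c.getD (k + 1) 0)) = !pvNI c := by
  induction c with
  | nil => simp [pvNI]
  | cons a t ih =>
      cases t with
      | nil => simp [pvNI]
      | cons b t' =>
          have hlen : (a :: b :: t').length - 1 = (b :: t').length - 1 + 1 := by simp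
          rw [hlen, List.range_succ_eq_map, List.any_cons, List.any_map]
          have : ((List.range ((b :: t').length - 1)).any
              fun k => decide ((a :: b :: t').getD (Nat.succ k) 0 < (a :: b :: t').getD (Nat.succ k + 1) 0))
              = ((List.range ((b :: t').length - 1)).any
              fun k => decide ((b :: t').getD k 0 < (b :: t').getD (k + 1) 0)) := by
            exact List.any_congr rfl (fun k => rfl)
          rw [Function.comp_def]
          rw [this, ih]
          simp only [pvNI, List.isChain_cons_cons, Bool.decide_and]
          show (decide (a < b) || _) = _
          by_cases hab : a < b
          · simp [hab, show ¬ (b ≤ a) by omega]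
          · simp [hab, show b ≤ a by omega]

theorem pvAnyInc_eq (c : List Int) : pvAnyInc c = !pvNI c := by
  rw [← pvRangeAny]
  show (PySem.List.pyRange 0 (PySem.List.len c - 1) 1).any _ = _
  rw [PySem.List.len_eq, pvPyRange_eq]
  rw [List.any_map]
  have hn : ((c.length : Int) - 1 - 0).toNat = c.length - 1 := by omega
  rw [hn]
  refine List.any_congr rfl (fun k => ?_)
  simp only [Function.comp]
  have h1 : (0 : Int) + (k : Int) = ((k : Nat) : Int) := by omega
  have h2 : (0 : Int) + (k : Int) + 1 = (((k + 1 : Nat)) : Int) := by push_cast; omega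
  simp only [h1, ← Nat.cast_add_one, PySem.List.pyGetD_natCast]

theorem pvFold_items (l : List (List Int)) :
    (List.foldl (fun d c => d.insert (pvKey c) c) PySem.Dict.empty l).items
      = (PySem.List.dedup l).map (fun c => (pvKey c, c)) := by
  induction l using List.reverseRecOn with
  | nil => simp [PySem.List.dedup, PySem.Set.ofList, PySem.Dict.empty]
  | append_singleton l c ih =>
      rw [List.foldl_append, List.foldl_cons, List.foldl_nil, pvDedup_append]
      set d := List.foldl (fun d c => d.insert (pvKey c) c) PySem.Dict.empty l with hd
      have hkeys : d.keys = (PySem.List.dedup l).map pvKey := by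
        show d.items.map Prod.fst = _
        rw [ih, List.map_map]
        rfl
      have hded : PySem.List.dedup [c] = [c] := by
        simp [PySem.List.dedup, PySem.Set.ofList, List.foldl, PySem.Set.add, PySem.Set.empty]
      rw [hded]
      by_cases hc : c ∈ l
      · have hcont : d.contains (pvKey c) = true := by
          rw [PySem.Dict.contains_iff_mem_keys, hkeys]
          exact List.mem_map.mpr ⟨c, (PySem.List.mem_dedup l c).mpr hc, rfl⟩
        rw [PySem.Dict.items_insert_of_contains _ _ hcont, ih]
        rw [List.filter_cons_of_neg (by simpa using hc), List.filter_nil, List.append_nil]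
        rw [List.map_map]
        apply List.map_congr_left
        intro y _
        simp only [Function.comp]
        by_cases hy : pvKey y = pvKey c
        · have : y = c := pvKey_inj _ _ hy
          subst this
          simp
        · rw [if_neg (by simpa using hy)]
      · have hcont : d.contains (pvKey c) = false := by
          rw [← Bool.not_eq_true, PySem.Dict.contains_iff_mem_keys, hkeys]
          intro hmem
          obtain ⟨y, hy, hkey⟩ := List.mem_map.mp hmem
          exact hc (pvKey_inj y c hkey ▸ (PySem.List.mem_dedup l y).mp hy)
        rw [PySem.Dict.items_insert_of_not_contains _ _ hcont, ih]
        rw [List.filter_cons_of_pos (by simpa using hc), List.filter_nil]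
        simp

theorem pvFoldl_flat {α : Type} (F : Int → List α) (ins : PySem.Dict String (List Int) → α → PySem.Dict String (List Int)) (l : List Int) (d : PySem.Dict String (List Int)) :
    l.foldl (fun d L => (F L).foldl ins d) d = (l.flatMap F).foldl ins d := by
  induction l generalizing d with
  | nil => rfl
  | cons x xs ih => rw [List.foldl_cons, List.flatMap_cons, List.foldl_append, ih]

theorem pvDedup_flatMap_disjoint {α : Type} [DecidableEq α] [BEq α] [LawfulBEq α]
    (f : Int → List α) (l : List Int)
    (hdis : ∀ x ∈ l, ∀ y ∈ l, ∀ c, c ∈ f x → c ∈ f y → x = y) :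
    l.Nodup → PySem.List.dedup (l.flatMap f) = l.flatMap (fun x => PySem.List.dedup (f x)) := by
  induction l with
  | nil => intro _; simp [PySem.List.dedup, PySem.Set.ofList]
  | cons x xs ih =>
      intro hnd
      rw [List.flatMap_cons, pvDedup_append, List.flatMap_cons]
      congr 1
      rw [ih (fun a ha b hb c hca hcb => hdis a (by simp [ha]) b (by simp [hb]) c hca hcb)
          hnd.of_cons]
      rw [List.filter_flatMap]
      apply pvFlatMap_congr
      intro y hy
      rw [List.filter_eq_self]
      intro c hc
      simp only [decide_eq_true_eq]
      intro hcx
      have : x = y := hdis x (by simp) y (by simp [hy]) c hcx ((PySem.List.mem_dedup _ c).mp hc)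
      exact (List.nodup_cons.mp hnd).1 (this ▸ hy)


theorem pvIf_flip (c : Bool) {α : Type} (a b : α) :
    (if c then a else b) = (if (!c) = true then b else a) := by
  cases c <;> rfl


theorem pvGen_some (u : List Int) (s : Int) (k : Nat) :
    (pvGen u none k).filter (fun t => match t with | [] => true | a :: _ => decide (a ≤ s))
      = pvGen u (some s) k := by
  rw [pvGen_eq_filter, pvGen_eq_filter, List.filter_filter]
  apply List.filter_congr
  intro c _
  cases c with
  | nil => rfl
  | cons a t =>
      show (decide (a ≤ s) && (true && pvNI (a :: t))) = (decide (a ≤ s) && pvNI (a :: t))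
      simp

theorem pvExtend_gen (u : List Int) (k : Nat) :
    pvExtend u (pvGen u none k) = pvGen u none (k + 1) := by
  show _ = u.flatMap _
  apply pvFlatMap_congr
  intro s _
  rw [if_pos rfl, pvGen_some]

theorem pvIterate_gen (u : List Int) (k : Nat) :
    (fun row => pvExtend u row)^[k] [[]] = pvGen u none k := by
  induction k with
  | zero => rfl
  | succ k ih => rw [Function.iterate_succ_apply', ih]; exact pvExtend_gen u k

theorem pvFoldl_const {α β : Type} (f : α → α) (l : List β) (init : α) :
    l.foldl (fun r _ => f r) init = f^[l.length] init := by
  induction l generalizing init with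
  | nil => rfl
  | cons x xs ih => rw [List.foldl_cons, ih, List.length_cons, Function.iterate_succ_apply]

theorem pvRow (u : List Int) (L : Int) :
    (PySem.List.pyRange 0 L 1).foldl (fun row _ => pvExtend u row) [[]] = pvGen u none L.toNat := by
  rw [pvFoldl_const, pvPyRange_eq]
  have hlen : ((List.range (L - 0).toNat).map (fun k : Nat => (0 : Int) + (k : Int))).length = L.toNat := by
    simp
  rw [hlen, pvIterate_gen]

-- ===== VERDICT (by name: the statement is the Claim_ definition above) =====
theorem make_layer_choices_spec : Claim_equal_make_layer_choices := by
  intro sizes minl maxl _hdom hpre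
  show make_layer_choices sizes minl maxl = make_layer_choices_alt sizes minl maxl
  rcases (em (0 ≤ minl)).symm with hneg | hmin
  · -- then Pre_ forces the empty range
    have hemp : maxl < minl := hpre.resolve_left hneg
    have hnil := pvPyRange_nil minl (maxl + 1) (by omega)
    unfold make_layer_choices make_layer_choices_alt
    rw [hnil]
    rfl
  · unfold make_layer_choices make_layer_choices_alt
    have hins : (fun (d : PySem.Dict String (List Int)) combo =>
        if pvAnyInc combo then d else d.insert (pvKey combo) combo)
        = (fun d combo => if (!pvAnyInc combo) = true then d.insert (pvKey combo) combo else d) := by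
      funext d combo
      exact pvIf_flip (pvAnyInc combo) _ _
    rw [hins]
    have hrow : ∀ L : Int, (PySem.List.pyRange 0 L 1).foldl
        (fun row _ => pvExtend (PySem.List.dedup sizes) row) [[]]
        = pvGen (PySem.List.dedup sizes) none L.toNat := pvRow _
    simp only [hrow]
    have hfoldA : ∀ (L : Int) (d : PySem.Dict String (List Int)),
        (pvProdPow sizes L.toNat).foldl
          (fun d combo => if (!pvAnyInc combo) = true then d.insert (pvKey combo) combo else d) d
        = ((pvProdPow sizes L.toNat).filter (fun c => !pvAnyInc c)).foldl
            (fun d combo => d.insert (pvKey combo) combo) d := by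
      intro L d
      rw [List.foldl_filter]
    simp only [hfoldA]
    rw [pvFoldl_flat (fun L => (pvProdPow sizes L.toNat).filter (fun c => !pvAnyInc c)),
      pvFoldl_flat (fun L => pvGen (PySem.List.dedup sizes) none L.toNat),
      pvFold_items, pvFold_items]
    congr 1
    -- disjointness of per-length chunks
    have hdisF : ∀ x ∈ PySem.List.pyRange minl (maxl + 1) 1, ∀ y ∈ PySem.List.pyRange minl (maxl + 1) 1,
        ∀ c, c ∈ (pvProdPow sizes x.toNat).filter (fun c => !pvAnyInc c) →
          c ∈ (pvProdPow sizes y.toNat).filter (fun c => !pvAnyInc c) → x = y := by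
      intro x hx y hy c hcx hcy
      have h1 := pvProdPow_length sizes x.toNat c (List.mem_of_mem_filter hcx)
      have h2 := pvProdPow_length sizes y.toNat c (List.mem_of_mem_filter hcy)
      have hx0 := pvPyRange_mem _ _ _ hx
      have hy0 := pvPyRange_mem _ _ _ hy
      omega
    have hdisG : ∀ x ∈ PySem.List.pyRange minl (maxl + 1) 1, ∀ y ∈ PySem.List.pyRange minl (maxl + 1) 1,
        ∀ c, c ∈ pvGen (PySem.List.dedup sizes) none x.toNat →
          c ∈ pvGen (PySem.List.dedup sizes) none y.toNat → x = y := by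
      intro x hx y hy c hcx hcy
      rw [pvGen_eq_filter] at hcx hcy
      have h1 := pvProdPow_length _ x.toNat c (List.mem_of_mem_filter hcx)
      have h2 := pvProdPow_length _ y.toNat c (List.mem_of_mem_filter hcy)
      have hx0 := pvPyRange_mem _ _ _ hx
      have hy0 := pvPyRange_mem _ _ _ hy
      omega
    rw [pvDedup_flatMap_disjoint _ _ hdisF (pvPyRange_nodup _ _),
      pvDedup_flatMap_disjoint _ _ hdisG (pvPyRange_nodup _ _)]
    apply pvFlatMap_congr
    intro L _
    have hg : pvGen (PySem.List.dedup sizes) none L.toNat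
        = (pvProdPow (PySem.List.dedup sizes) L.toNat).filter (fun c => !pvAnyInc c) := by
      rw [pvGen_eq_filter]
      apply List.filter_congr
      intro c _
      rw [pvAnyInc_eq c]
      show (pvBOk none c && pvNI c) = !(!pvNI c)
      simp [pvBOk]
    have hnodup : (pvProdPow (PySem.List.dedup sizes) L.toNat).Nodup := by
      have : pvProdPow (PySem.List.dedup sizes) L.toNat
          = PySem.List.dedup (pvProdPow (PySem.List.dedup sizes) L.toNat) := by
        rw [pvDedup_prodPow, pvDedup_nodup (PySem.List.dedup sizes) (PySem.List.nodup_dedup _)]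
      rw [this]
      exact PySem.List.nodup_dedup _
    rw [hg, pvDedup_filter, pvDedup_prodPow]
    exact (pvDedup_nodup _ (hnodup.filter _)).symm
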